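-- pv_equiv track=rewrite | github.com/Taggagii/misc | old-stuff/Some definitions.py | sum_of_consecutive_primes
-- ===== SOURCE A (Python) =====
-- def sum_of_consecutive_primes(number, primes):
--     '''
--     if it is the sum of consecutive primes, will return a list of them
--     else returns False
--     '''
--     summ = 0
--     numbers = []
--     for prime in primes:
--         summ += prime
--         numbers.append(prime)
--         if summ == number: return len(numbers)
--         if summ > number:
--             for prime2 in primes:
--                 summ -= prime2
--                 numbers.remove(prime2)
--                 if summ == number: return len(numbers)
--                 if summ < number: return 0
-- ===== SOURCE B (Python) =====
-- def sum_of_consecutive_primes(number, primes):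
--     '''
--     if it is the sum of consecutive primes, will return a list of them
--     else returns False
--     '''
--     if not primes or sum(primes) < number:
--         return None
--     total = 0
--     for j, p in enumerate(primes):
--         total += p
--         if total >= number:
--             break
--     else:
--         return None
--     if total == number:
--         return j + 1
--     i = 0
--     while total > number:
--         total -= primes[i]
--         i += 1
--     return j + 1 - i if total == number else 0
-- ===== Notes on version B (the rewrite author's own statement) =====
-- stated objective: alternative
-- what changed: Replaces A's restart-and-mutate inner loop (numbers.append / numbers.remove on a shadow list, with len() of the mutated list as the answer) by a sum() prefilter plus a single pass keeping only an integer running sum and two integer counters (break index, shrink pointer), with no list mutation at all.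
-- outside the precondition, e.g. on sum_of_consecutive_primes(-1, [2]): A returns None, B raises IndexError; on sum_of_consecutive_primes(-1, [2, 3]): A raises ValueError, B returns 0
import Mathlib
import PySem

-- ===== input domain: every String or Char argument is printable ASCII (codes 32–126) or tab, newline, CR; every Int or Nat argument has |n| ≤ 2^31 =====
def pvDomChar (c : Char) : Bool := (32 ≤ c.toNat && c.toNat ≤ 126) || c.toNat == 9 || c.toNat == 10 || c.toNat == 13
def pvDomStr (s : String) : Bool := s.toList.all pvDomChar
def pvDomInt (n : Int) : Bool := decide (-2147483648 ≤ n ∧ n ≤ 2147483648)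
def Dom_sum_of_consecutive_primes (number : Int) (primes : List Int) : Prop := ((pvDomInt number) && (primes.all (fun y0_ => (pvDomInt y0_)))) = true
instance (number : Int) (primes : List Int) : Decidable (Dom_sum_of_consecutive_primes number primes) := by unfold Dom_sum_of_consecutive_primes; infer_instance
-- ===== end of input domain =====

-- B replaces A's list-mutating restart loop (numbers.append/list.remove with len() of the
-- mutated shadow list as the answer) by a sum() prefilter and a single pass over integer
-- running sums with two integer counters; no list mutation (objective: alternative).

-- ===== PORT A =====
-- inner 'for prime2 in primes' loop: .inl r = the loop returned r from the function
-- (.inl none stands for the ValueError of numbers.remove, excluded by Pre_),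
-- .inr (summ, numbers) = the loop finished and the outer loop continues with this state.
def pvInnerA (number : Int) : List Int → Int → List Int → (Option Int) ⊕ (Int × List Int)
  | [], summ, numbers => .inr (summ, numbers)
  | p2 :: rest, summ, numbers =>
      let summ' := summ - p2
      match PySem.List.remove? numbers p2 with
      | none => .inl none
      | some numbers' =>
        if summ' = number then .inl (some (numbers'.length : Int))
        else if summ' < number then .inl (some 0)
        else pvInnerA number rest summ' numbers'

-- outer 'for prime in primes' loop; primesAll kept for the inner loop's 'for prime2 in primes'.
def pvOuterA (number : Int) (primesAll : List Int) : List Int → Int → List Int → Option Int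
  | [], _, _ => none
  | p :: rest, summ, numbers =>
      let summ' := summ + p
      let numbers' := numbers ++ [p]
      if summ' = number then some (numbers'.length : Int)
      else if summ' > number then
        match pvInnerA number primesAll summ' numbers' with
        | .inl r => r
        | .inr (s, ns) => pvOuterA number primesAll rest s ns
      else pvOuterA number primesAll rest summ' numbers'

def sum_of_consecutive_primes (number : Int) (primes : List Int) : Option Int :=
  pvOuterA number primes primes 0 []

-- ===== PORT B =====
-- B's 'for j, p in enumerate(primes)' loop: grow the prefix until its sum reaches number; none = loop fell through.
def pvGrowB (number : Int) : List Int → Int → Int → Option (Int × Int)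
  | [], _, _ => none
  | p :: rest, total, m =>
      let total' := total + p
      let m' := m + 1
      if total' ≥ number then some (total', m') else pvGrowB number rest total' m'

-- B's while-loop: pop primes[i] off the front while total > number (walking the list = the
-- successive primes[i]); returns (total, i).
def pvShrinkB (number : Int) : List Int → Int → Int → Int × Int
  | [], total, i => (total, i)
  | p :: rest, total, i =>
      if total > number then pvShrinkB number rest (total - p) (i + 1) else (total, i)

def sum_of_consecutive_primes_alt (number : Int) (primes : List Int) : Option Int :=
  -- 'if not primes or sum(primes) < number: return None' (total below target: no window reaches it)
  if primes.length = 0 ∨ primes.sum < number then none else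
  match pvGrowB number primes 0 0 with
  | none => none
  | some (total, m) =>
    if total = number then some m
    else
      let ti := pvShrinkB number primes total 0
      if ti.1 = number then some (m - ti.2) else some 0

-- ===== PRECONDITION & SPEC =====
-- Pre_ covers the function's natural domain — a nonnegative target with positive list entries —
-- plus every input whose prefix sums all stay below the target (there both loops just fall
-- through and return None whatever the signs are). Outside Pre_ (a negative target or
-- nonpositive entries with some prefix sum reaching the target) A's remove loop, which always
-- restarts from primes[0], can underflow and raise ValueError, and where A still happens to
-- return, B's pointer-based shrink loop can overrun the list and raise IndexError instead.
def Pre_sum_of_consecutive_primes (number : Int) (primes : List Int) : Prop :=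
  (0 ≤ number ∧ ∀ p ∈ primes, 1 ≤ p) ∨
  (∀ j ∈ List.range primes.length, (primes.take (j + 1)).sum < number)
instance (number : Int) (primes : List Int) : Decidable (Pre_sum_of_consecutive_primes number primes) := by unfold Pre_sum_of_consecutive_primes; infer_instance

def pvWitness_sum_of_consecutive_primes : Int × List Int := (10, [2, 3, 5, 7])

def Spec_sum_of_consecutive_primes (number : Int) (primes : List Int) (out : Option Int) : Prop := out = sum_of_consecutive_primes_alt number primes
instance (number : Int) (primes : List Int) (out : Option Int) : Decidable (Spec_sum_of_consecutive_primes number primes out) := by unfold Spec_sum_of_consecutive_primes; infer_instance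

-- ===== CLAIM (what is proved, stated in full; the proofs are below) =====
def Claim_equal_sum_of_consecutive_primes : Prop := ∀ (number : Int) (primes : List Int), Dom_sum_of_consecutive_primes number primes → Pre_sum_of_consecutive_primes number primes → Spec_sum_of_consecutive_primes number primes (sum_of_consecutive_primes number primes)

-- ===== LEMMAS AND PROOFS =====

-- pvShrinkB's counter only shifts the second component.
theorem pvShrinkB_shift (number : Int) (l : List Int) (total : Int) (i : Int) :
    pvShrinkB number l total i = ((pvShrinkB number l total 0).1, i + (pvShrinkB number l total 0).2) := by
  induction l generalizing total i with
  | nil => simp [pvShrinkB]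
  | cons p rest ih =>
      simp only [pvShrinkB]
      split_ifs with h
      · rw [ih (total - p) (i + 1), ih (total - p) (0 + 1)]
        simp only [Prod.mk.injEq, true_and]
        ring
      · simp

-- when total ≤ number the shrink loop stops immediately.
theorem pvShrinkB_stop (number : Int) (l : List Int) (total : Int) (h : ¬ total > number) :
    pvShrinkB number l total 0 = (total, 0) := by
  cases l with
  | nil => simp [pvShrinkB]
  | cons q rest => simp only [pvShrinkB]; rw [if_neg h]

-- Inner loop vs shrink loop: when the inner loop is entered with numbers = w (a prefix of the
-- primes list, sum > number, positive entries), it returns exactly B's shrink verdict.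
theorem pvInnerA_eq_shrink (number : Int) (w tail : List Int) (summ : Int)
    (hpos : ∀ p ∈ w, 1 ≤ p) (hsum : summ = w.sum) (hgt : summ > number) (hn : 0 ≤ number) :
    pvInnerA number (w ++ tail) summ w =
      .inl (some (if (pvShrinkB number (w ++ tail) summ 0).1 = number
                  then (w.length : Int) - (pvShrinkB number (w ++ tail) summ 0).2 else 0)) := by
  induction w generalizing summ with
  | nil => simp [hsum] at hgt; omega
  | cons p rest ih =>
      have hremove : PySem.List.remove? (p :: rest) p = some rest :=
        PySem.List.remove?_cons_self p rest
      simp only [List.cons_append, pvInnerA, hremove, pvShrinkB, if_pos hgt]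
      rw [pvShrinkB_shift number (rest ++ tail) (summ - p) (0 + 1)]
      by_cases h1 : summ - p = number
      · rw [pvShrinkB_stop number (rest ++ tail) (summ - p) (by omega)]
        simp [h1]
      · by_cases h2 : summ - p < number
        · rw [pvShrinkB_stop number (rest ++ tail) (summ - p) (by omega)]
          simp [h1, h2]
        · have hgt' : summ - p > number := by omega
          have hsum' : summ - p = rest.sum := by simp [hsum]
          simp only [if_neg h1, if_neg h2]
          rw [ih (summ - p) (fun q hq => hpos q (List.mem_cons_of_mem p hq)) hsum' hgt']
          by_cases h3 : (pvShrinkB number (rest ++ tail) (summ - p) 0).1 = number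
          · simp only [if_pos h3, List.length_cons]
            push_cast
            ring_nf
          · simp [h3]

-- If every prefix sum stays below number, A's outer loop never fires a branch: None.
theorem pvOuterA_none (number : Int) (primesAll : List Int) (rest : List Int) (w : List Int)
    (summ : Int) (hsum : summ = w.sum)
    (hlt : ∀ j ∈ List.range rest.length, summ + (rest.take (j + 1)).sum < number) :
    pvOuterA number primesAll rest summ w = none := by
  induction rest generalizing w summ with
  | nil => simp [pvOuterA]
  | cons p rest ih =>
      have h0 : summ + p < number := by
        have := hlt 0 (by simp)
        simpa using this
      simp only [pvOuterA]
      rw [if_neg (by omega), if_neg (by omega)]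
      apply ih (w ++ [p]) (summ + p) (by simp [hsum])
      intro j hj
      have := hlt (j + 1) (by simp at hj ⊢; omega)
      simpa [add_assoc] using this

-- Outer loop vs grow loop, generalized over the already-consumed prefix w.
theorem pvOuterA_eq_alt (number : Int) (primes : List Int) (w rest : List Int) (summ : Int)
    (hsplit : primes = w ++ rest) (hsum : summ = w.sum) (hle : summ ≤ number) (hn : 0 ≤ number)
    (hpos : ∀ p ∈ primes, 1 ≤ p) :
    pvOuterA number primes rest summ w =
      (match pvGrowB number rest summ (w.length : Int) with
       | none => none
       | some (total, m) =>
         if total = number then some m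
         else
           let ti := pvShrinkB number primes total 0
           if ti.1 = number then some (m - ti.2) else some 0) := by
  induction rest generalizing w summ with
  | nil => simp [pvOuterA, pvGrowB]
  | cons p rest ih =>
      subst hsum
      have hposw : ∀ q ∈ w ++ [p], 1 ≤ q := by
        intro q hq
        apply hpos
        rw [hsplit]
        rcases List.mem_append.mp hq with h | h
        · exact List.mem_append.mpr (Or.inl h)
        · simp at h; subst h; simp
      simp only [pvOuterA, pvGrowB]
      by_cases h1 : w.sum + p = number
      · simp [h1]
      · simp only [if_neg h1]
        by_cases h2 : number < w.sum + p
        · have hge : number ≤ w.sum + p := le_of_lt h2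
          have hsplit' : primes = (w ++ [p]) ++ rest := by simp [hsplit]
          simp only [if_pos h2, if_pos hge, if_neg h1, hsplit']
          rw [pvInnerA_eq_shrink number (w ++ [p]) rest (w.sum + p) hposw (by simp) h2 hn]
          by_cases h3 : (pvShrinkB number (w ++ [p] ++ rest) (w.sum + p) 0).1 = number
          · simp only [if_pos h3, Option.some.injEq]
            simp only [List.length_append, List.length_cons, List.length_nil]
            push_cast
            ring
          · rw [if_neg h3, if_neg h3]
        · have hnge : ¬ (number ≤ w.sum + p) := by omega
          simp only [if_neg h2, if_neg hnge]
          have hsplit' : primes = (w ++ [p]) ++ rest := by simp [hsplit]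
          have := ih (w ++ [p]) (w.sum + p) hsplit' (by simp) (by omega)
          simpa using this

-- a prefix sum of a nonnegative list is at most the total sum.
theorem pvTake_sum_le (l : List Int) (k : Nat) (hpos : ∀ p ∈ l, 0 ≤ p) :
    (l.take k).sum ≤ l.sum := by
  have hsplit : (l.take k).sum + (l.drop k).sum = l.sum := by
    rw [← List.sum_append, List.take_append_drop]
  have hdrop : 0 ≤ (l.drop k).sum :=
    List.sum_nonneg (fun p hp => hpos p (List.mem_of_mem_drop hp))
  omega

-- ===== VERDICT (by name: the statement is the Claim_ definition above) =====
theorem sum_of_consecutive_primes_spec : Claim_equal_sum_of_consecutive_primes := by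
  intro number primes _ hpre
  unfold Spec_sum_of_consecutive_primes sum_of_consecutive_primes sum_of_consecutive_primes_alt
  by_cases hguard : primes.length = 0 ∨ primes.sum < number
  · rw [if_pos hguard]
    rcases hguard with hnil | hsumlt
    · rw [List.length_eq_zero_iff.mp hnil]; rfl
    · rcases hpre with ⟨hn, hpos⟩ | hlt
      · apply pvOuterA_none number primes primes [] 0 (by simp)
        intro j hj
        have hle := pvTake_sum_le primes (j + 1) (fun p hp => le_trans (by norm_num) (hpos p hp))
        simpa using lt_of_le_of_lt hle hsumlt
      · apply pvOuterA_none number primes primes [] 0 (by simp) (by simpa using hlt)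
  · rw [if_neg hguard]
    rw [not_or, not_lt] at hguard
    rcases hpre with ⟨hn, hpos⟩ | hlt
    · have := pvOuterA_eq_alt number primes [] primes 0 (by simp) (by simp) hn hn hpos
      simpa using this
    · exfalso
      have hne : primes.length ≠ 0 := hguard.1
      have hlast := hlt (primes.length - 1) (by simp [List.mem_range]; omega)
      rw [show primes.length - 1 + 1 = primes.length by omega, List.take_length] at hlast
      exact absurd hlast (not_lt.mpr hguard.2)
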